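-- pv_equiv track=rewrite | github.com/louzounlab-microbiome/microbiome | dafna/general_functions.py | shorten_bact_names
-- ===== SOURCE A (Python) =====
-- def pop_idx(idx, objects_to_remove_idx_from):
--     idx.reverse()
--     for obj in objects_to_remove_idx_from:
--         for i in idx:
--             obj.pop(i)
--     return objects_to_remove_idx_from
--
-- def shorten_bact_names(bacterias):
--     # extract the last meaningful name - long multi level names to the lowest level definition
--     short_bacterias_names = []
--     for f in bacterias:
--         i = 1
--         while len(f.split(";")[-i]) < 5 or f.split(";")[-i] == 'Unassigned':  # meaningless name
--             i += 1
--             if i > len(f.split(";")):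
--                 i -= 1
--                 break
--         short_bacterias_names.append(f.split(";")[-i])
--     # remove "k_bacteria" and "Unassigned" samples - irrelevant
--     k_bact_idx = []
--     for i, bact in enumerate(short_bacterias_names):
--         if bact == 'k__Bacteria' or bact == 'Unassigned':
--             k_bact_idx.append(i)
--
--     if k_bact_idx:
--         [short_bacterias_names, bacterias] = pop_idx(k_bact_idx, [short_bacterias_names, bacterias])
--
--     return short_bacterias_names, bacterias
-- ===== SOURCE B (Python) =====
-- def shorten_bact_names(bacterias):
--     # One pass: split each name once, pick the last segment that is >= 5 chars and not
--     # 'Unassigned' (falling back to the first segment), and collect removal indices of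
--     # irrelevant short names; then delete those entries from bacterias in place.
--     short_bacterias_names = []
--     removed = []
--     for idx, f in enumerate(bacterias):
--         segs = f.split(";")
--         name = next((s for s in reversed(segs) if len(s) >= 5 and s != 'Unassigned'), segs[0])
--         if name == 'k__Bacteria' or name == 'Unassigned':
--             removed.append(idx)
--         else:
--             short_bacterias_names.append(name)
--     for i in reversed(removed):
--         del bacterias[i]
--     return short_bacterias_names, bacterias
-- ===== Notes on version B (the rewrite author's own statement) =====
-- stated objective: simpler
-- what changed: B fuses A's three traversals (shorten loop, index-collecting loop, pop_idx removal over two lists) into one pass that splits each name once and picks the short name with next() over reversed segments, then deletes the recorded bad indices from bacterias in place; the pop_idx helper and A's repeated f.split(';') calls inside the while condition disappear.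
import Mathlib
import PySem

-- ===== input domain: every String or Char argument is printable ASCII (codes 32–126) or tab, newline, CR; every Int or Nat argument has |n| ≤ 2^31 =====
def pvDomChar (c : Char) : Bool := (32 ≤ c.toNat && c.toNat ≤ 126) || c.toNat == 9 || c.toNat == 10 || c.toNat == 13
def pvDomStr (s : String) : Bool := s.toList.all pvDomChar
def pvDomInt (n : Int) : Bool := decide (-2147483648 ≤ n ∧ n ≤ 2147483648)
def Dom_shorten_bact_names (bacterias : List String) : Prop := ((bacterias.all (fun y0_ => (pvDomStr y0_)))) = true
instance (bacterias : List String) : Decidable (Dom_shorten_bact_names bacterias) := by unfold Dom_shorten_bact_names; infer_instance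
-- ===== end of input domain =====

-- B fuses A's three traversals into one pass that splits each name once (A re-splits inside its
-- while loop) and then deletes the collected bad indices from `bacterias`; equivalence proved is
-- about the RETURN value (both Pythons also mutate the `bacterias` argument in place identically).

-- ===== PORT A =====

-- f.split(";"): ";" ≠ "" so Str.split? is `some`; the getD [] default is never taken
def pvSplit (f : String) : List String := (PySem.Str.split? f ";").getD []

-- A's while loop, returning the final i; f.split(";")[-i] is re-evaluated in the condition as in
-- the Python.  The getD "" on the indexing is never taken (the loop only reads indices 1..len,
-- always in range); fuel = len(f.split(";")) suffices since i grows by 1 per iteration.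
def pvALoop (f : String) (i : Nat) : Nat → Nat
  | 0 => i
  | fuel + 1 =>
    if PySem.Str.len ((PySem.List.pyGet? (pvSplit f) (-(i : Int))).getD "") < 5 ∨
        ((PySem.List.pyGet? (pvSplit f) (-(i : Int))).getD "") = "Unassigned" then
      if (pvSplit f).length < i + 1 then i else pvALoop f (i + 1) fuel
    else i

-- the value A appends for one f: f.split(";")[-i] after the while loop
def pvAShort (f : String) : String :=
  (PySem.List.pyGet? (pvSplit f) (-((pvALoop f 1 (pvSplit f).length : Nat) : Int))).getD ""

-- pop_idx: reverse idx, then for each obj pop every index (the popped value is discarded; the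
-- indices are always in range at the call site, so the getD is never taken)
def pop_idx (idx : List Int) (objs : List (List String)) : List (List String) :=
  let ridx := idx.reverse
  objs.map (fun obj => ridx.foldl (fun o i => ((PySem.List.pop? o i).map (·.2)).getD o) obj)

def shorten_bact_names (bacterias : List String) : List String × List String :=
  let short := bacterias.foldl (fun acc f => acc ++ [pvAShort f]) []
  let k_bact_idx := (PySem.List.enumerate short 0).foldl
      (fun acc p => if p.2 = "k__Bacteria" ∨ p.2 = "Unassigned" then acc ++ [p.1] else acc) []
  if k_bact_idx ≠ [] then
    match pop_idx k_bact_idx [short, bacterias] with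
    | [s2, b2] => (s2, b2)
    | _ => ([], [])   -- unreachable: pop_idx maps over the two-element list
  else (short, bacterias)

-- ===== PORT B =====

-- the filter of B's generator expression: len(s) >= 5 and s != 'Unassigned'
def pvBGood (s : String) : Bool := decide (5 ≤ PySem.Str.len s) && !(s == "Unassigned")

-- next((s for s in reversed(segs) if len(s) >= 5 and s != 'Unassigned'), segs[0]);
-- split never returns an empty list, so the headD "" default for segs[0] is never taken
def pvBShort (f : String) : String :=
  let segs := (PySem.Str.split? f ";").getD []
  (segs.reverse.find? pvBGood).getD (segs.headD "")

def shorten_bact_names_alt (bacterias : List String) : List String × List String :=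
  let sr := (PySem.List.enumerate bacterias 0).foldl
    (fun (acc : List String × List Int) p =>
      let name := pvBShort p.2
      if name = "k__Bacteria" ∨ name = "Unassigned" then (acc.1, acc.2 ++ [p.1])
      else (acc.1 ++ [name], acc.2)) ([], [])
  -- for i in reversed(removed): del bacterias[i]   (index always in range: getD never taken)
  let kept := sr.2.reverse.foldl (fun l i => ((PySem.List.pop? l i).map (·.2)).getD l) bacterias
  (sr.1, kept)

-- ===== PRECONDITION & SPEC =====
def Spec_shorten_bact_names (bacterias : List String) (out : List String × List String) : Prop := out = shorten_bact_names_alt bacterias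
instance (bacterias : List String) (out : List String × List String) : Decidable (Spec_shorten_bact_names bacterias out) := by unfold Spec_shorten_bact_names; infer_instance

-- ===== CLAIM (what is proved, stated in full; the proofs are below) =====
def Claim_equal_shorten_bact_names : Prop := ∀ (bacterias : List String), Dom_shorten_bact_names bacterias → Spec_shorten_bact_names bacterias (shorten_bact_names bacterias)

-- ===== LEMMAS AND PROOFS =====

-- the removal test on a short name, as a Bool
def pvBad (s : String) : Bool := s == "k__Bacteria" || s == "Unassigned"

-- positions (from offset s) of the elements of l satisfying p
def pvIdxList (p : String → Bool) : List String → Nat → List Int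
  | [], _ => []
  | x :: xs, s => (if p x then [(s : Int)] else []) ++ pvIdxList p xs (s + 1)

-- the pop fold both ports run
def pvPops (l : List String) (idx : List Int) : List String :=
  idx.foldl (fun o i => ((PySem.List.pop? o i).map (·.2)).getD o) l

theorem pvHeadD_eq (l : List String) (h : 0 < l.length) : l.headD "" = l[0] := by
  cases l with
  | nil => simp at h
  | cons a t => rfl

theorem pvDropRev (l : List String) (i : Nat) (h1 : 1 ≤ i) (h2 : i ≤ l.length) :
    l.reverse.drop (i - 1) = l[l.length - i] :: l.reverse.drop i := by
  have hlt : i - 1 < l.reverse.length := by simp; omega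
  rw [List.drop_eq_getElem_cons hlt]
  have h3 : i - 1 + 1 = i := by omega
  rw [h3]
  congr 1
  rw [List.getElem_reverse]
  congr 1
  omega

-- A's while loop computes B's reversed-find?, with segs[0] as the fallback
theorem pvALoop_spec (f : String) (fuel : Nat) : ∀ (i : Nat), 1 ≤ i → i ≤ (pvSplit f).length →
    (pvSplit f).length ≤ fuel + i →
    (PySem.List.pyGet? (pvSplit f) (-((pvALoop f i fuel : Nat) : Int))).getD ""
      = (((pvSplit f).reverse.drop (i - 1)).find? pvBGood).getD ((pvSplit f).headD "") := by
  induction fuel with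
  | zero =>
    intro i h1 h2 hf
    have hi : i = (pvSplit f).length := by omega
    have hL : 0 < (pvSplit f).length := by omega
    rw [pvALoop]
    rw [PySem.List.pyGet?_neg_natCast _ i (by omega) h2]
    rw [pvDropRev (pvSplit f) i h1 h2]
    rw [List.drop_eq_nil_of_le (by simp; omega)]
    rw [pvHeadD_eq _ hL]
    simp only [show (pvSplit f).length - i = 0 by omega]
    rw [List.getElem?_eq_getElem hL, Option.getD_some]
    by_cases hg : pvBGood ((pvSplit f)[0])
    · simp [List.find?, hg]
    · simp only [List.find?, Bool.not_eq_true] at hg ⊢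
      rw [hg]
      simp
  | succ fuel ih =>
    intro i h1 h2 hf
    have hL : 0 < (pvSplit f).length := by omega
    rw [pvALoop]
    rw [PySem.List.pyGet?_neg_natCast _ i (by omega) h2]
    rw [pvDropRev (pvSplit f) i h1 h2]
    rw [List.getElem?_eq_getElem (by omega : (pvSplit f).length - i < (pvSplit f).length), Option.getD_some]
    set s := (pvSplit f)[(pvSplit f).length - i] with hsdef
    by_cases hc : PySem.Str.len s < 5 ∨ s = "Unassigned"
    · have hg : pvBGood s = false := by
        rcases hc with h | h
        · simp only [PySem.Str.len, String.length_toList] at h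
          simp [pvBGood]; intro hle; omega
        · simp [pvBGood, h]
      rw [if_pos hc]
      by_cases hend : (pvSplit f).length < i + 1
      · have hi : i = (pvSplit f).length := by omega
        rw [if_pos hend]
        rw [PySem.List.pyGet?_neg_natCast _ i (by omega) h2]
        simp only [List.find?, hg]
        rw [List.drop_eq_nil_of_le (by simp; omega)]
        rw [pvHeadD_eq _ hL]
        simp only [show (pvSplit f).length - i = 0 by omega]
        rw [List.getElem?_eq_getElem hL, Option.getD_some]
        simp [List.find?]
      · rw [if_neg hend]
        rw [ih (i+1) (by omega) (by omega) (by omega)]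
        simp only [List.find?, hg]
        congr 2
    · have hg : pvBGood s = true := by
        rw [not_or] at hc
        simp only [PySem.Str.len, String.length_toList] at hc
        simp [pvBGood, hc.2]
        omega
      rw [if_neg hc]
      rw [PySem.List.pyGet?_neg_natCast _ i (by omega) h2]
      rw [List.getElem?_eq_getElem (by omega : (pvSplit f).length - i < (pvSplit f).length), Option.getD_some]
      simp [List.find?, hg]
      rfl

theorem pvShort_eq (f : String) : pvAShort f = pvBShort f := by
  by_cases h : (pvSplit f).length = 0
  · have hnil : pvSplit f = [] := List.length_eq_zero_iff.mp h
    rw [pvAShort, pvBShort]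
    show (PySem.List.pyGet? (pvSplit f) (-((pvALoop f 1 (pvSplit f).length : Nat) : Int))).getD ""
      = ((pvSplit f).reverse.find? pvBGood).getD ((pvSplit f).headD "")
    rw [hnil]
    simp [pvALoop, PySem.List.pyGet?]
  · have h1 : 1 ≤ (pvSplit f).length := by omega
    rw [pvAShort, pvBShort]
    show (PySem.List.pyGet? (pvSplit f) (-((pvALoop f 1 (pvSplit f).length : Nat) : Int))).getD ""
      = ((pvSplit f).reverse.find? pvBGood).getD ((pvSplit f).headD "")
    rw [pvALoop_spec f (pvSplit f).length 1 (by omega) h1 (by omega)]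
    simp

theorem pvIdxList_map (p : String → Bool) (g : String → String) (l : List String) (s : Nat) :
    pvIdxList p (l.map g) s = pvIdxList (fun x => p (g x)) l s := by
  induction l generalizing s with
  | nil => rfl
  | cons x xs ih => simp [pvIdxList, List.map, ih]

theorem pvIdxList_nil_iff (p : String → Bool) (l : List String) (s : Nat) :
    pvIdxList p l s = [] ↔ ∀ x ∈ l, p x = false := by
  induction l generalizing s with
  | nil => simp [pvIdxList]
  | cons x xs ih =>
    by_cases h : p x <;> simp [pvIdxList, h, ih]

theorem pvAIdx_fold (l : List String) : ∀ (sn : Nat) (acc : List Int),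
    (PySem.List.enumerate l (sn : Int)).foldl
      (fun acc p => if p.2 = "k__Bacteria" ∨ p.2 = "Unassigned" then acc ++ [p.1] else acc) acc
      = acc ++ pvIdxList pvBad l sn := by
  induction l with
  | nil => intro sn acc; simp [pvIdxList, PySem.List.enumerate_nil]
  | cons x xs ih =>
    intro sn acc
    rw [PySem.List.enumerate_cons]
    have hc : ((sn : Int) + 1) = ((sn + 1 : Nat) : Int) := by push_cast; ring
    by_cases hb : x = "k__Bacteria" ∨ x = "Unassigned"
    · have hpb : pvBad x = true := by rcases hb with h | h <;> simp [pvBad, h]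
      simp only [List.foldl_cons, if_pos hb, hc, ih, pvIdxList, hpb, if_pos]
      simp
    · have hpb : pvBad x = false := by
        simp only [pvBad, Bool.or_eq_false_iff, beq_eq_false_iff_ne]
        exact ⟨fun h => hb (Or.inl h), fun h => hb (Or.inr h)⟩
      simp only [List.foldl_cons, if_neg hb, hc, ih, pvIdxList, hpb, if_neg, Bool.false_eq_true,
        not_false_iff, List.nil_append]

theorem pvBFold_spec (l : List String) : ∀ (sn : Nat) (acc : List String × List Int),
    (PySem.List.enumerate l (sn : Int)).foldl
      (fun (acc : List String × List Int) p =>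
        let name := pvBShort p.2
        if name = "k__Bacteria" ∨ name = "Unassigned" then (acc.1, acc.2 ++ [p.1])
        else (acc.1 ++ [name], acc.2)) acc
      = (acc.1 ++ ((l.map pvBShort).filter (fun x => !pvBad x)),
         acc.2 ++ pvIdxList (fun x => pvBad (pvBShort x)) l sn) := by
  induction l with
  | nil => intro sn acc; simp [pvIdxList, PySem.List.enumerate_nil]
  | cons x xs ih =>
    intro sn acc
    rw [PySem.List.enumerate_cons]
    have hc : ((sn : Int) + 1) = ((sn + 1 : Nat) : Int) := by push_cast; ring
    by_cases hb : pvBShort x = "k__Bacteria" ∨ pvBShort x = "Unassigned"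
    · have hpb : pvBad (pvBShort x) = true := by rcases hb with h | h <;> simp [pvBad, h]
      simp only [List.foldl_cons, if_pos hb, hc, ih, pvIdxList, if_pos, List.map_cons,
        List.filter_cons, Bool.not_eq_true', hpb]
      simp
    · have hpb : pvBad (pvBShort x) = false := by
        simp only [pvBad, Bool.or_eq_false_iff, beq_eq_false_iff_ne]
        exact ⟨fun h => hb (Or.inl h), fun h => hb (Or.inr h)⟩
      simp only [List.foldl_cons, if_neg hb, hc, ih, pvIdxList, hpb, List.map_cons,
        List.filter_cons, Bool.not_false, if_neg, Bool.false_eq_true, not_false_iff,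
        List.nil_append]
      simp

theorem pvEraseIdx_append (pre rest : List String) (x : String) :
    (pre ++ x :: rest).eraseIdx pre.length = pre ++ rest := by
  induction pre with
  | nil => rfl
  | cons a t ih => simp [ih]

-- popping, from the back, exactly the positions whose element satisfies p is filtering
theorem pvPops_idxList (p : String → Bool) (l : List String) : ∀ (pre : List String) (s : Nat),
    pre.length = s → pvPops (pre ++ l) (pvIdxList p l s).reverse = pre ++ l.filter (fun x => !p x) := by
  induction l with
  | nil => intro pre s hs; simp [pvIdxList, pvPops]
  | cons x xs ih =>
    intro pre s hs
    have h2 : pvPops (pre ++ x :: xs) (pvIdxList p xs (s+1)).reverse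
        = pre ++ x :: xs.filter (fun x => !p x) := by
      have := ih (pre ++ [x]) (s+1) (by simp [hs])
      simpa using this
    by_cases hp : p x
    · simp only [pvIdxList, hp, if_pos, List.reverse_append, List.reverse_singleton]
      have hsplit : pvPops (pre ++ x :: xs) ((pvIdxList p xs (s+1)).reverse ++ [(s:Int)])
          = pvPops (pvPops (pre ++ x :: xs) (pvIdxList p xs (s+1)).reverse) [(s:Int)] := by
        simp [pvPops, List.foldl_append]
      rw [hsplit, h2]
      have hpop := PySem.List.pop?_natCast (pre ++ x :: xs.filter (fun x => !p x)) pre.length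
        (by simp)
      simp only [pvPops, List.foldl_cons, List.foldl_nil, ← hs, hpop, Option.map_some,
        Option.getD_some, pvEraseIdx_append]
      simp [hp]
    · simp only [pvIdxList, hp, if_neg, List.nil_append, Bool.not_eq_true]
      rw [h2]
      simp [hp]

-- ===== VERDICT (by name: the statement is the Claim_ definition above) =====
theorem shorten_bact_names_spec : Claim_equal_shorten_bact_names := by
  intro bacterias _
  unfold Spec_shorten_bact_names shorten_bact_names shorten_bact_names_alt
  have hshort : bacterias.foldl (fun acc f => acc ++ [pvAShort f]) []
      = bacterias.map pvBShort := by
    rw [PySem.List.foldl_append_singleton_eq_map]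
    simp [List.map_congr_left (fun f _ => pvShort_eq f)]
  simp only [hshort]
  have hA := pvAIdx_fold (List.map pvBShort bacterias) 0 []
  have hBf := pvBFold_spec bacterias 0 ([], [])
  simp only [Nat.cast_zero, List.nil_append] at hA hBf
  rw [hA, hBf]
  rw [pvIdxList_map pvBad pvBShort bacterias 0]
  set short := bacterias.map pvBShort with hshortdef
  set idx := pvIdxList (fun x => pvBad (pvBShort x)) bacterias 0 with hidx
  have hbact : pvPops bacterias idx.reverse = bacterias.filter (fun x => !pvBad (pvBShort x)) := by
    have := pvPops_idxList (fun x => pvBad (pvBShort x)) bacterias [] 0 rfl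
    simpa [hidx] using this
  have hshortpop : pvPops short idx.reverse = short.filter (fun x => !pvBad x) := by
    rw [hidx, ← pvIdxList_map pvBad pvBShort bacterias 0]
    have := pvPops_idxList pvBad (bacterias.map pvBShort) [] 0 rfl
    simpa [hshortdef] using this
  by_cases hne : idx = []
  · rw [if_neg (by simp [hne])]
    have hall := (pvIdxList_nil_iff (fun x => pvBad (pvBShort x)) bacterias 0).mp hne
    have hfilt : short.filter (fun x => !pvBad x) = short := by
      apply List.filter_eq_self.mpr
      intro x hx
      rcases List.mem_map.mp (hshortdef ▸ hx) with ⟨b, hb, rfl⟩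
      simp [hall b hb]
    show (short, bacterias) = (short.filter (fun x => !pvBad x), pvPops bacterias idx.reverse)
    rw [hfilt, hbact]
    congr 1
    symm
    apply List.filter_eq_self.mpr
    intro x hx
    simp [hall x hx]
  · rw [if_pos hne]
    have hpe : pop_idx idx [short, bacterias]
        = [pvPops short idx.reverse, pvPops bacterias idx.reverse] := by
      simp [pop_idx, pvPops]
    rw [hpe]
    show (pvPops short idx.reverse, pvPops bacterias idx.reverse)
      = (short.filter (fun x => !pvBad x), pvPops bacterias idx.reverse)
    rw [hshortpop]
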